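-- pv_equiv track=rewrite | github.com/Reneechang17/Leetcode-Solution | 1001-2000/1772. Sort Features by Popularity.py | sortFeatures
-- ===== SOURCE A (Python) =====
-- from typing import List
--
-- def sortFeatures(features: List[str], responses: List[str]) -> List[str]:
--     count = {feature: 0 for feature in features}
--
--     for res in responses:
--         words = set(res.split())
--         for word in words:
--             if word in count:
--                 count[word] += 1
--
--     idx_feature = [(feature, i) for i, feature in enumerate(features)]
--     idx_feature.sort(key=lambda x: (-count[x[0]], x[1]))
--
--     return [feature for feature, _ in idx_feature]
-- ===== SOURCE B (Python) =====
-- from typing import List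
--
-- def sortFeatures(features: List[str], responses: List[str]) -> List[str]:
--     count = {feature: 0 for feature in features}
--
--     for res in responses:
--         for word in set(res.split()):
--             if word in count:
--                 count[word] += 1
--
--     # bucket by popularity: counts lie in 0..len(responses); walk buckets high->low,
--     # original order inside a bucket gives the stable-by-index tiebreak
--     buckets = [[] for _ in range(len(responses) + 1)]
--     for feature in features:
--         buckets[count[feature]].append(feature)
--
--     out = []
--     for bucket in reversed(buckets):
--         out += bucket
--     return out
-- ===== Notes on version B (the rewrite author's own statement) =====
-- stated objective: alternative
-- what changed: Replaces A's comparison sort of (feature,index) pairs under the (-count, index) tuple key with a bucket sort: features are appended in original order to one bucket per popularity count and the buckets are concatenated from the highest count down.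
import Mathlib
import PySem

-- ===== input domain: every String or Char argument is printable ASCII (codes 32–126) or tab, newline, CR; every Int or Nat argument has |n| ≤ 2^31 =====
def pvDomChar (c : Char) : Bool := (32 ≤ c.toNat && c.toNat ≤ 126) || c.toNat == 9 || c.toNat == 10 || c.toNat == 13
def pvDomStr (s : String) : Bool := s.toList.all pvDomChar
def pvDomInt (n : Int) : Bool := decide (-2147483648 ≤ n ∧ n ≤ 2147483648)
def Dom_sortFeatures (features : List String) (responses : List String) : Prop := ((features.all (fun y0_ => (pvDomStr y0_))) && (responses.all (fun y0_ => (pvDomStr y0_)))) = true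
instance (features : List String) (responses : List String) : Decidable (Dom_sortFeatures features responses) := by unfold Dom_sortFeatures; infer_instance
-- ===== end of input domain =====

-- B replaces A's sort by a (-count, index) tuple key with bucket lists indexed by count,
-- concatenated from highest count down (original order inside a bucket = the index tiebreak).

-- ===== PORT A =====
def sortFeatures (features : List String) (responses : List String) : List String :=
  let count : PySem.Dict String Int :=
    features.foldl (fun d feature => d.insert feature 0) PySem.Dict.empty
  let count :=
    responses.foldl (fun d res =>
      (PySem.Set.ofList (PySem.Str.split₀ res)).foldl
        (fun d word => if d.contains word then d.modify word 0 (· + 1) else d) d) count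
  let idx_feature : List (String × Int) :=
    (PySem.List.enumerate features).map (fun p => (p.2, p.1))
  let sortedPairs :=
    PySem.List.sorted2 idx_feature (fun x => -(count.getD x.1 0)) (fun x => x.2)
  sortedPairs.map (fun p => p.1)

-- ===== PORT B =====
def sortFeatures_alt (features : List String) (responses : List String) : List String :=
  let count : PySem.Dict String Int :=
    features.foldl (fun d feature => d.insert feature 0) PySem.Dict.empty
  let count :=
    responses.foldl (fun d res =>
      (PySem.Set.ofList (PySem.Str.split₀ res)).foldl
        (fun d word => if d.contains word then d.modify word 0 (· + 1) else d) d) count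
  let buckets : List (List String) := List.replicate (responses.length + 1) []
  let buckets :=
    features.foldl (fun bs feature => bs.modify (count.getD feature 0).toNat (· ++ [feature])) buckets
  buckets.reverse.foldl (fun out bucket => out ++ bucket) []

-- ===== PRECONDITION & SPEC =====
def Spec_sortFeatures (features : List String) (responses : List String) (out : List String) : Prop := out = sortFeatures_alt features responses
instance (features : List String) (responses : List String) (out : List String) : Decidable (Spec_sortFeatures features responses out) := by unfold Spec_sortFeatures; infer_instance

-- ===== CLAIM (what is proved, stated in full; the proofs are below) =====
def Claim_equal_sortFeatures : Prop := ∀ (features : List String) (responses : List String), Dom_sortFeatures features responses → Spec_sortFeatures features responses (sortFeatures features responses)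

-- ===== LEMMAS AND PROOFS =====

-- the shared counting loop of the two ports, named for the proofs
def pvCount (features : List String) (responses : List String) : PySem.Dict String Int :=
  responses.foldl (fun d res =>
      (PySem.Set.ofList (PySem.Str.split₀ res)).foldl
        (fun d word => if d.contains word then d.modify word 0 (· + 1) else d) d)
    (features.foldl (fun d feature => d.insert feature 0) PySem.Dict.empty)

lemma getD_insertZero_fold (l : List String) (d : PySem.Dict String Int) (g : String)
    (h : d.getD g 0 = 0) : (l.foldl (fun d f => d.insert f 0) d).getD g 0 = 0 := by
  induction l generalizing d with
  | nil => exact h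
  | cons f l ih =>
      refine ih _ ?_
      rw [PySem.Dict.getD_insert]
      split <;> simp [h]

lemma getD_wordFold_untouched (ws : List String) (d : PySem.Dict String Int) (f : String)
    (h : f ∉ ws) :
    (ws.foldl (fun d w => if d.contains w then d.modify w 0 (· + 1) else d) d).getD f 0
      = d.getD f 0 := by
  induction ws generalizing d with
  | nil => rfl
  | cons w ws ih =>
      simp only [List.mem_cons, not_or] at h
      simp only [List.foldl_cons]
      rw [ih _ h.2]
      split
      · rw [PySem.Dict.getD_modify]; simp [h.1]
      · rfl

lemma getD_wordFold_inc (ws : List String) (hnd : ws.Nodup) (d : PySem.Dict String Int) (f : String) :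
    (ws.foldl (fun d w => if d.contains w then d.modify w 0 (· + 1) else d) d).getD f 0
      = d.getD f 0 ∨
    (ws.foldl (fun d w => if d.contains w then d.modify w 0 (· + 1) else d) d).getD f 0
      = d.getD f 0 + 1 := by
  induction ws generalizing d with
  | nil => exact Or.inl rfl
  | cons w ws ih =>
      rcases List.nodup_cons.1 hnd with ⟨hw, hnd'⟩
      simp only [List.foldl_cons]
      by_cases hf : f = w
      · subst hf
        rw [getD_wordFold_untouched ws _ f hw]
        split
        · right; rw [PySem.Dict.getD_modify]; simp
        · left; rfl
      · have hstep : (if d.contains w then d.modify w 0 (· + 1) else d).getD f 0 = d.getD f 0 := by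
          split
          · rw [PySem.Dict.getD_modify]; simp [hf]
          · rfl
        rcases ih hnd' (if d.contains w then d.modify w 0 (· + 1) else d) with h | h <;>
          rw [h, hstep] <;> [exact Or.inl rfl; exact Or.inr rfl]

lemma getD_respFold_bounds (rs : List String) (d : PySem.Dict String Int) (f : String) :
    d.getD f 0 ≤ (rs.foldl (fun d res =>
        (PySem.Set.ofList (PySem.Str.split₀ res)).foldl
          (fun d word => if d.contains word then d.modify word 0 (· + 1) else d) d) d).getD f 0 ∧
    (rs.foldl (fun d res =>
        (PySem.Set.ofList (PySem.Str.split₀ res)).foldl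
          (fun d word => if d.contains word then d.modify word 0 (· + 1) else d) d) d).getD f 0
      ≤ d.getD f 0 + rs.length := by
  induction rs generalizing d with
  | nil => simp
  | cons r rs ih =>
      simp only [List.foldl_cons, List.length_cons]
      have hstep := getD_wordFold_inc (PySem.Set.ofList (PySem.Str.split₀ r))
        (PySem.Set.nodup_ofList _) d f
      have := ih ((PySem.Set.ofList (PySem.Str.split₀ r)).foldl
          (fun d word => if d.contains word then d.modify word 0 (· + 1) else d) d)
      rcases hstep with h | h <;> rw [h] at this <;> omega

lemma pvCount_bounds (features responses : List String) (f : String) :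
    0 ≤ (pvCount features responses).getD f 0 ∧
    (pvCount features responses).getD f 0 ≤ (responses.length : Int) := by
  unfold pvCount
  have h0 : (features.foldl (fun d f => d.insert f (0 : Int)) PySem.Dict.empty).getD f 0 = 0 :=
    getD_insertZero_fold features _ f (by simp [PySem.Dict.getD_empty])
  have := getD_respFold_bounds responses
    (features.foldl (fun d f => d.insert f (0 : Int)) PySem.Dict.empty) f
  rw [h0] at this
  omega

-- sorted with a tuple key is sorted with the lexicographic key
lemma sorted2_eq_sorted_lex {α : Type} (xs : List α) (k1 k2 : α → Int) :
    PySem.List.sorted2 xs k1 k2 false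
      = PySem.List.sorted xs (fun x => toLex (k1 x, k2 x)) false := by
  show xs.foldl _ [] = xs.foldl _ []
  congr 1
  funext acc x
  congr 1
  funext a b
  have : (decide (k1 a < k1 b) || (!decide (k1 b < k1 a) && decide (k2 a < k2 b)))
      = decide (toLex (k1 a, k2 a) < toLex (k1 b, k2 b)) := by
    rw [Bool.eq_iff_iff]
    simp only [Bool.or_eq_true, Bool.and_eq_true, Bool.not_eq_true', decide_eq_true_eq,
      decide_eq_false_iff_not, Prod.Lex.lt_iff, ofLex_toLex]
    omega
  exact this

-- the bucket-filling fold, described bucket by bucket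
lemma bucketFold_eq_map_range (l : List String) (k : String → Nat) (m : Nat) (g : Nat → List String)
    (h : ∀ f ∈ l, k f < m) :
    l.foldl (fun bs f => bs.modify (k f) (· ++ [f])) ((List.range m).map g)
      = (List.range m).map (fun j => g j ++ l.filter (fun f => k f == j)) := by
  induction l generalizing g with
  | nil => simp
  | cons f l ih =>
      simp only [List.foldl_cons]
      have hf : k f < m := h f (List.mem_cons_self ..)
      have hmod : ((List.range m).map g).modify (k f) (· ++ [f])
          = (List.range m).map (fun j => if k f = j then g j ++ [f] else g j) := by
        apply List.ext_getElem
        · simp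
        · intro i h1 h2
          simp only [List.length_modify, List.length_map, List.length_range] at h1
          rw [List.getElem_modify]
          simp [List.getElem_map, List.getElem_range]
      rw [hmod, ih _ (fun x hx => h x (List.mem_cons_of_mem _ hx))]
      apply List.map_congr_left
      intro j hj
      by_cases hkf : k f = j <;> simp [hkf, List.append_assoc]

lemma filter_append_filter_perm {α : Type} (l : List α) (k : α → Nat) (j : Nat) (js : List Nat)
    (hj : j ∉ js) :
    (l.filter (fun x => k x == j) ++ l.filter (fun x => decide (k x ∈ js))).Perm
      (l.filter (fun x => decide (k x ∈ j :: js))) := by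
  induction l with
  | nil => simp
  | cons x l ihl =>
      simp only [List.filter_cons]
      by_cases hx : k x = j
      · rw [if_pos (by simp [hx]), if_neg (by simp [hx, hj]), if_pos (by simp [hx])]
        exact ihl.cons x
      · by_cases hxs : k x ∈ js
        · rw [if_neg (by simp [hx]), if_pos (by simp [hxs]), if_pos (by simp [hxs])]
          exact List.perm_middle.trans (ihl.cons x)
        · rw [if_neg (by simp [hx]), if_neg (by simp [hxs]), if_neg (by simp [hx, hxs])]
          exact ihl

-- concatenating per-key filters over distinct keys is a permutation of one filter
lemma flatMap_filter_perm {α : Type} (js : List Nat) (hnd : js.Nodup) (l : List α) (k : α → Nat) :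
    (js.flatMap fun j => l.filter (fun x => k x == j)).Perm
      (l.filter (fun x => decide (k x ∈ js))) := by
  induction js with
  | nil => simp
  | cons j js ih =>
      rcases List.nodup_cons.1 hnd with ⟨hj, hnd'⟩
      simp only [List.flatMap_cons]
      refine ((ih hnd').append_left _).trans ?_
      exact filter_append_filter_perm l k j js hj

-- within one bucket, all pairs carry the same first key component
lemma pairwise_bucket (pairs : List (String × Int)) (c : String → Int)
    (hnn : ∀ f, 0 ≤ c f) (j : Nat)
    (hp : pairs.Pairwise (fun a b => a.2 < b.2)) :
    (pairs.filter (fun p => (c p.1).toNat == j)).Pairwise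
      (fun a b => toLex (-(c a.1), a.2) < toLex (-(c b.1), b.2)) := by
  refine (hp.filter _).imp_of_mem ?_
  intro a b ha hb hlt
  have ha' := (List.mem_filter.1 ha).2
  have hb' := (List.mem_filter.1 hb).2
  simp only [beq_iff_eq] at ha' hb'
  have hca : c a.1 = (j : Int) := by have := hnn a.1; omega
  have hcb : c b.1 = (j : Int) := by have := hnn b.1; omega
  rw [Prod.Lex.lt_iff]
  right
  simp [hca, hcb, hlt]

-- ===== VERDICT (by name: the statement is the Claim_ definition above) =====
theorem sortFeatures_spec : Claim_equal_sortFeatures := by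
  intro features responses _
  unfold Spec_sortFeatures sortFeatures sortFeatures_alt
  show (PySem.List.sorted2 ((PySem.List.enumerate features).map (fun p => (p.2, p.1)))
          (fun x => -((pvCount features responses).getD x.1 0)) (fun x => x.2)).map (fun p => p.1)
      = ((features.foldl (fun bs feature =>
            bs.modify ((pvCount features responses).getD feature 0).toNat (· ++ [feature]))
          (List.replicate (responses.length + 1) [])).reverse).foldl (fun out bucket => out ++ bucket) []
  set c := pvCount features responses with hc
  have hnn : ∀ f, 0 ≤ c.getD f 0 := fun f => (pvCount_bounds features responses f).1
  have hub : ∀ f, c.getD f 0 ≤ (responses.length : Int) :=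
    fun f => (pvCount_bounds features responses f).2
  set n := responses.length with hn
  set k : String → Nat := fun f => (c.getD f 0).toNat with hk
  have hklt : ∀ f, k f < n + 1 := by
    intro f; have := hnn f; have := hub f; simp only [hk]; omega
  set pairs : List (String × Int) := (PySem.List.enumerate features).map (fun p => (p.2, p.1))
    with hpairs
  set js : List Nat := (List.range (n + 1)).reverse with hjs
  -- ===== B side =====
  have hrepl : (List.replicate (n + 1) ([] : List String))
      = (List.range (n + 1)).map (fun _ => []) := by
    rw [List.map_const', List.length_range]
  have hbuck : features.foldl (fun bs f => bs.modify (c.getD f 0).toNat (· ++ [f]))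
        (List.replicate (n + 1) [])
      = (List.range (n + 1)).map (fun j => features.filter (fun f => k f == j)) := by
    rw [hrepl]
    have := bucketFold_eq_map_range features k (n + 1) (fun _ => [])
      (fun f _ => hklt f)
    simp only [hk] at this ⊢
    rw [this]
    simp
  have hB : ((features.foldl (fun bs f => bs.modify (c.getD f 0).toNat (· ++ [f]))
          (List.replicate (n + 1) [])).reverse).foldl (fun out b => out ++ b) []
      = js.flatMap (fun j => features.filter (fun f => k f == j)) := by
    rw [hbuck, PySem.List.foldl_append_eq_flatten, ← List.map_reverse, ← hjs,
      List.nil_append, ← List.flatMap_def]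
  rw [hB]
  -- ===== A side =====
  rw [sorted2_eq_sorted_lex]
  have hpairsnd : pairs.Pairwise (fun a b => a.2 < b.2) := by
    rw [hpairs, List.pairwise_map]
    exact List.Pairwise.imp (fun h => h) (PySem.List.pairwise_lt_enumerate features 0)
  have hndjs : js.Nodup := by rw [hjs, List.nodup_reverse]; exact List.nodup_range
  set ys : List (String × Int) := js.flatMap (fun j => pairs.filter (fun p => k p.1 == j))
    with hys
  have hperm : ys.Perm pairs := by
    refine (flatMap_filter_perm js hndjs pairs (fun p => k p.1)).trans ?_
    have heq : List.filter (fun x => decide (k x.1 ∈ js)) pairs = pairs :=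
      List.filter_eq_self.2 (by intro p _; simp [hjs, List.mem_reverse, List.mem_range, hklt p.1])
    rw [heq]
  have hpair : ys.Pairwise (fun a b =>
      toLex (-(c.getD a.1 0), a.2) < toLex (-(c.getD b.1 0), b.2)) := by
    rw [hys, List.flatMap_def, List.pairwise_flatten]
    constructor
    · intro l' hl'
      rcases List.mem_map.1 hl' with ⟨j, _, rfl⟩
      exact pairwise_bucket pairs (fun f => c.getD f 0) hnn j hpairsnd
    · rw [List.pairwise_map]
      have hjsgt : js.Pairwise (fun a b => b < a) := by
        rw [hjs, List.pairwise_reverse]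
        exact List.pairwise_lt_range
      refine hjsgt.imp_of_mem ?_
      intro j1 j2 _ _ hlt x hx y hy
      have hx' := (List.mem_filter.1 hx).2
      have hy' := (List.mem_filter.1 hy).2
      simp only [beq_iff_eq, hk] at hx' hy'
      have hcx : c.getD x.1 0 = (j1 : Int) := by have := hnn x.1; omega
      have hcy : c.getD y.1 0 = (j2 : Int) := by have := hnn y.1; omega
      rw [Prod.Lex.lt_iff]
      left
      simp only [ofLex_toLex, hcx, hcy]
      omega
  rw [PySem.List.sorted_eq_of_perm_of_pairwise_lt pairs ys
    (fun x => toLex (-(c.getD x.1 0), x.2)) hperm hpair]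
  -- map fst over the bucketed pairs
  rw [hys, List.map_flatMap]
  congr 1
  funext j
  rw [hpairs, List.filter_map, List.map_map]
  rw [show ((fun p : String × Int => p.1) ∘ (fun p : Int × String => (p.2, p.1)))
      = (fun p : Int × String => p.2) from rfl]
  rw [show ((fun p : String × Int => k p.1 == j) ∘ (fun p : Int × String => (p.2, p.1)))
      = ((fun f => k f == j) ∘ (fun p : Int × String => p.2)) from rfl]
  rw [← List.filter_map, PySem.List.map_snd_enumerate]
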